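-- pv_equiv track=rewrite | github.com/Xemnas0/wikitext_to_logseq | src/converter.py | _extract_infobox
-- ===== SOURCE A (Python) =====
-- def _extract_infobox(wikitext: str) -> str | None:
--     """Extract the first Infobox in the input string
--
--     Args:
--         wikitext (str): Text with Wikitext format
--
--     Returns:
--         str: Infobox, if any, None otherwise
--     """
--     start_idx = wikitext.find("{{Infobox")
--     if start_idx == -1:
--         return None, wikitext
--     end_idx = start_idx + len("{{Infobox")
--     count = 1
--     while count > 0 and end_idx < len(wikitext):
--         if (
--             wikitext[end_idx] == "{"
--             and end_idx < len(wikitext) - 1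
--             and wikitext[end_idx + 1] == "{"
--         ):
--             count += 1
--             end_idx += 2
--         elif (
--             wikitext[end_idx] == "}"
--             and end_idx < len(wikitext) - 1
--             and wikitext[end_idx + 1] == "}"
--         ):
--             count -= 1
--             end_idx += 2
--         else:
--             end_idx += 1
--     if count == 0:
--         return wikitext[start_idx:end_idx], wikitext[end_idx:]
--     else:
--         return None, wikitext
-- ===== SOURCE B (Python) =====
-- def _extract_infobox(wikitext: str):
--     """Extract the first Infobox (balanced {{...}}) and the remainder.
--
--     Jumps between '{{' / '}}' tokens with str.find instead of scanning
--     char by char."""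
--     start_idx = wikitext.find("{{Infobox")
--     if start_idx == -1:
--         return None, wikitext
--     pos = start_idx + len("{{Infobox")
--     count = 1
--     while count > 0:
--         o = wikitext.find("{{", pos)
--         c = wikitext.find("}}", pos)
--         if c == -1:
--             return None, wikitext
--         if o != -1 and o < c:
--             count += 1
--             pos = o + 2
--         else:
--             count -= 1
--             pos = c + 2
--     return wikitext[start_idx:pos], wikitext[pos:]
-- ===== Notes on version B (the rewrite author's own statement) =====
-- stated objective: idiomatic
-- what changed: The char-by-char scan with manual two-char lookahead is replaced by a loop that jumps directly to the next '{{' or '}}' token using str.find with a start offset.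
import Mathlib
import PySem

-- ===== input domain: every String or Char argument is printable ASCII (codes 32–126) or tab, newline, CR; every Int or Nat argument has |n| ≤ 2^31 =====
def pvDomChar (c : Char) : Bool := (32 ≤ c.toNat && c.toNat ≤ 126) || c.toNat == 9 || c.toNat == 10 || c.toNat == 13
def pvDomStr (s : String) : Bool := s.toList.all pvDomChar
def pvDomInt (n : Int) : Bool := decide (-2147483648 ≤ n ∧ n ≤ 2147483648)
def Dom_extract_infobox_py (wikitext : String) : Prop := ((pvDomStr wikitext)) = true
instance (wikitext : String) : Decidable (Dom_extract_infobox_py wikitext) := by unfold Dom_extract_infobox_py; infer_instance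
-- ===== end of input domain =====

-- B replaces A's char-by-char brace scan with a loop that jumps straight between
-- the next '{{' / '}}' tokens via str.find (idiomatic rewrite; same return value).

-- ===== PORT A =====
-- A's while loop: char-by-char scan over (end_idx, count); returns the final (end_idx, count).
def pvAloop (s : List Char) (i count : Nat) : Nat × Nat :=
  if _h : count ≠ 0 ∧ i < s.length then
    if PySem.List.pyGet? s (i : Int) = some '{' ∧ i < s.length - 1 ∧
        PySem.List.pyGet? s ((i + 1 : Nat) : Int) = some '{' then
      pvAloop s (i + 2) (count + 1)
    else if PySem.List.pyGet? s (i : Int) = some '}' ∧ i < s.length - 1 ∧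
        PySem.List.pyGet? s ((i + 1 : Nat) : Int) = some '}' then
      pvAloop s (i + 2) (count - 1)
    else pvAloop s (i + 1) count
  else (i, count)
termination_by s.length - i
decreasing_by all_goals omega

def extract_infobox_py (wikitext : String) : Option String × String :=
  let start_idx := PySem.Str.find wikitext "{{Infobox"
  if start_idx = -1 then (none, wikitext)
  else
    let r := pvAloop wikitext.toList (start_idx.toNat + 9) 1
    if r.2 = 0 then
      (some (PySem.Str.slice wikitext (some start_idx) (some (r.1 : Int))),
       PySem.Str.slice wikitext (some (r.1 : Int)) none)
    else (none, wikitext)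

-- ===== PORT B =====
-- B's while loop: jump to the next '{{' / '}}' token with find; some pos = balanced close
-- found ending at pos, none = no closing '}}' left (fuel s.length+1 suffices: pos grows by ≥ 2).
def pvBloop (s : List Char) : Nat → Nat → Nat → Option Nat
  | 0, _, _ => none
  | fuel + 1, pos, count =>
    if count = 0 then some pos
    else
      let o := PySem.Chars.findFrom s "{{".toList (pos : Int) none
      let c := PySem.Chars.findFrom s "}}".toList (pos : Int) none
      if c = -1 then none
      else if o ≠ -1 ∧ o < c then pvBloop s fuel (o.toNat + 2) (count + 1)
      else pvBloop s fuel (c.toNat + 2) (count - 1)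

def extract_infobox_py_alt (wikitext : String) : Option String × String :=
  let start_idx := PySem.Str.find wikitext "{{Infobox"
  if start_idx = -1 then (none, wikitext)
  else
    match pvBloop wikitext.toList (wikitext.toList.length + 1) (start_idx.toNat + 9) 1 with
    | some pos =>
      (some (PySem.Str.slice wikitext (some start_idx) (some (pos : Int))),
       PySem.Str.slice wikitext (some (pos : Int)) none)
    | none => (none, wikitext)

-- ===== PRECONDITION & SPEC =====
def Spec_extract_infobox_py (wikitext : String) (out : Option String × String) : Prop := out = extract_infobox_py_alt wikitext
instance (wikitext : String) (out : Option String × String) : Decidable (Spec_extract_infobox_py wikitext out) := by unfold Spec_extract_infobox_py; infer_instance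

-- ===== CLAIM (what is proved, stated in full; the proofs are below) =====
def Claim_equal_extract_infobox_py : Prop := ∀ (wikitext : String), Dom_extract_infobox_py wikitext → Spec_extract_infobox_py wikitext (extract_infobox_py wikitext)

-- ===== LEMMAS AND PROOFS =====

-- a two-char pattern is a prefix of s.drop i iff the two elements match
theorem pvPair_prefix (a b : Char) (s : List Char) (i : Nat) :
    [a, b] <+: s.drop i ↔ s[i]? = some a ∧ s[i + 1]? = some b := by
  rw [show s[i]? = (s.drop i)[0]? by simp [List.getElem?_drop],
      show s[i+1]? = (s.drop i)[1]? by simp [List.getElem?_drop]]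
  rcases hd : s.drop i with _ | ⟨x, _ | ⟨y, t⟩⟩ <;>
    simp [List.cons_prefix_iff]

-- A's two-char test at i is exactly "[a, a] is a prefix of s.drop i"
theorem pvTok_iff (a : Char) (s : List Char) (i : Nat) :
    (PySem.List.pyGet? s (i : Int) = some a ∧ i < s.length - 1 ∧
      PySem.List.pyGet? s ((i + 1 : Nat) : Int) = some a)
      ↔ [a, a] <+: s.drop i := by
  rw [pvPair_prefix]
  simp only [PySem.List.pyGet?_natCast]
  constructor
  · rintro ⟨h1, _, h3⟩; exact ⟨h1, h3⟩
  · rintro ⟨h1, h3⟩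
    refine ⟨h1, ?_, h3⟩
    obtain ⟨hlt, -⟩ := List.getElem?_eq_some_iff.mp h3
    omega

-- find from the end of the string misses any non-empty pattern
theorem pvFF_end (s sub : List Char) (h : sub ≠ []) :
    PySem.Chars.findFrom s sub (s.length : Int) none = -1 := by
  rw [PySem.Chars.findFrom_natCast_eq_neg_one_iff s sub s.length le_rfl]
  simp [List.infix_nil, h]

-- find returns the start position itself when the pattern sits right there
theorem pvFF_self (s sub : List Char) (k : Nat) (hk : k ≤ s.length)
    (h : sub <+: s.drop k) : PySem.Chars.findFrom s sub (k : Int) none = (k : Int) := by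
  have hne : PySem.Chars.findFrom s sub (k : Int) none ≠ -1 := by
    intro hcon
    exact ((PySem.Chars.findFrom_natCast_eq_neg_one_iff s sub k hk).mp hcon) h.isInfix
  obtain ⟨h1, h2, h3⟩ := PySem.Chars.findFrom_natCast_spec s sub k hk hne
  have h0 : (0:Int) ≤ PySem.Chars.findFrom s sub (k : Int) none :=
    le_trans (Int.natCast_nonneg k) h1
  have hle : (PySem.Chars.findFrom s sub (k : Int) none).toNat ≤ k := by
    by_contra hgt
    exact h3 k le_rfl (by omega) h
  omega

theorem pvDrop_infix_mono (s sub : List Char) (i j : Nat) (hij : i ≤ j)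
    (h : sub <:+: s.drop j) : sub <:+: s.drop i := by
  rw [show s.drop j = (s.drop i).drop (j - i) by rw [List.drop_drop]; congr 1; omega] at h
  exact h.trans ((List.drop_suffix _ _).isInfix)

-- advancing the start position past a non-match does not change find's result
theorem pvFF_step (s sub : List Char) (k : Nat) (hk : k < s.length)
    (h : ¬ sub <+: s.drop k) :
    PySem.Chars.findFrom s sub (k : Int) none = PySem.Chars.findFrom s sub ((k + 1 : Nat) : Int) none := by
  have hk1 : k + 1 ≤ s.length := hk
  by_cases h2 : PySem.Chars.findFrom s sub ((k + 1 : Nat) : Int) none = -1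
  · rw [h2]
    rw [PySem.Chars.findFrom_natCast_eq_neg_one_iff s sub k (le_of_lt hk)]
    rw [PySem.Chars.findFrom_natCast_eq_neg_one_iff s sub (k+1) hk1] at h2
    intro hcon
    obtain ⟨j, hj⟩ := (PySem.Chars.exists_prefix_drop_iff_isIn sub (s.drop k)).mpr
      ((PySem.Chars.isIn_iff_infix sub (s.drop k)).mpr hcon)
    rw [List.drop_drop] at hj
    rcases j with _ | j
    · exact h (by simpa using hj)
    · exact h2 ((PySem.Chars.isIn_iff_infix _ _).mp
        ((PySem.Chars.exists_prefix_drop_iff_isIn sub (s.drop (k+1))).mp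
          ⟨j, by rw [List.drop_drop, show k + 1 + j = k + (j + 1) from by omega]; exact hj⟩))
  · obtain ⟨g1, g2, g3⟩ := PySem.Chars.findFrom_natCast_spec s sub (k+1) hk1 h2
    set r2 := PySem.Chars.findFrom s sub ((k + 1 : Nat) : Int) none with hr2
    have h02 : (0:Int) ≤ r2 := le_trans (Int.natCast_nonneg (k+1)) g1
    have hne : PySem.Chars.findFrom s sub (k : Int) none ≠ -1 := by
      intro hcon
      exact ((PySem.Chars.findFrom_natCast_eq_neg_one_iff s sub k (le_of_lt hk)).mp hcon)
        (pvDrop_infix_mono s sub k r2.toNat (by omega) g2.isInfix)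
    obtain ⟨f1, f2, f3⟩ := PySem.Chars.findFrom_natCast_spec s sub k (le_of_lt hk) hne
    set r1 := PySem.Chars.findFrom s sub (k : Int) none with hr1
    have h01 : (0:Int) ≤ r1 := le_trans (Int.natCast_nonneg k) f1
    have hr1k : r1.toNat ≠ k := by
      intro he; rw [he] at f2; exact h f2
    have e1 : r2.toNat ≤ r1.toNat := by
      by_contra hgt
      exact g3 r1.toNat (by omega) (by omega) f2
    have e2 : r1.toNat ≤ r2.toNat := by
      by_contra hgt
      exact f3 r2.toNat (by omega) (by omega) g2
    omega

-- if no '}}' occurs at or after i, A's count never returns to 0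
theorem pvNoClose (s : List Char) (i count : Nat) (hc : count ≠ 0)
    (h : ¬ ("}}".toList <:+: s.drop i)) : (pvAloop s i count).2 ≠ 0 := by
  rw [pvAloop]
  split
  · next hcond =>
    split
    · exact pvNoClose s (i + 2) (count + 1) (by omega)
        (fun hcon => h (pvDrop_infix_mono s _ i (i + 2) (by omega) hcon))
    · split
      · next htok =>
        exact absurd (((pvTok_iff '}' s i).mp htok).isInfix) (by simpa using h)
      · exact pvNoClose s (i + 1) count hc
          (fun hcon => h (pvDrop_infix_mono s _ i (i + 1) (by omega) hcon))
  · simpa using hc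
termination_by s.length - i
decreasing_by all_goals omega

-- the two loops agree: A's scan outcome, read as an Option, is B's token-jump outcome
theorem pvLoop_eq (s : List Char) (n i count fuel : Nat) (hn : s.length - i ≤ n)
    (hi : i ≤ s.length) (hf : s.length + 1 ≤ fuel + i) :
    (if (pvAloop s i count).2 = 0 then some (pvAloop s i count).1 else none)
      = pvBloop s fuel i count := by
  have hoc : "{{".toList = ['{', '{'] := by decide
  have hcc : "}}".toList = ['}', '}'] := by decide
  obtain ⟨f, rfl⟩ : ∃ f, fuel = f + 1 := ⟨fuel - 1, by omega⟩
  by_cases hc0 : count = 0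
  · subst hc0
    rw [pvAloop, pvBloop]
    simp
  · by_cases hil : i < s.length
    · by_cases hT1 : ['{', '{'] <+: s.drop i
      · have hi2 : i + 2 ≤ s.length := by
          have := hT1.length_le; simp at this; omega
        by_cases hcm : PySem.Chars.findFrom s ['}', '}'] (i : Int) none = -1
        · have hni : ¬ ("}}".toList <:+: s.drop i) := by
            rw [hcc]
            exact (PySem.Chars.findFrom_natCast_eq_neg_one_iff s _ i hi).mp hcm
          rw [if_neg (pvNoClose s i count hc0 hni), pvBloop]
          simp only [hoc, hcc, if_neg hc0, if_pos hcm]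
        · have ho : PySem.Chars.findFrom s ['{', '{'] (i : Int) none = (i : Int) :=
            pvFF_self s _ i hi hT1
          obtain ⟨g1, g2, g3⟩ := PySem.Chars.findFrom_natCast_spec s ['}', '}'] i hi hcm
          have h0c : (0:Int) ≤ PySem.Chars.findFrom s ['}', '}'] (i : Int) none :=
            le_trans (Int.natCast_nonneg i) g1
          have hcne : (PySem.Chars.findFrom s ['}', '}'] (i : Int) none).toNat ≠ i := by
            intro he
            rw [he, pvPair_prefix] at g2
            have h1 := ((pvPair_prefix '{' '{' s i).mp hT1).1
            rw [h1] at g2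
            simp at g2
          rw [pvAloop, dif_pos ⟨hc0, hil⟩, if_pos ((pvTok_iff '{' s i).mpr hT1)]
          rw [pvBloop]
          simp only [hoc, hcc, if_neg hc0, if_neg hcm, ho]
          have hcond : ((i : Int) ≠ -1 ∧ (i : Int) < PySem.Chars.findFrom s ['}', '}'] (i : Int) none) :=
            ⟨by omega, by omega⟩
          rw [if_pos hcond]
          simp only [Int.toNat_natCast]
          exact pvLoop_eq s (n - 1) (i + 2) (count + 1) f (by omega) hi2 (by omega)
      · by_cases hT2 : ['}', '}'] <+: s.drop i
        · have hi2 : i + 2 ≤ s.length := by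
            have := hT2.length_le; simp at this; omega
          have hcF : PySem.Chars.findFrom s ['}', '}'] (i : Int) none = (i : Int) :=
            pvFF_self s _ i hi hT2
          have hno : ¬ (PySem.Chars.findFrom s ['{', '{'] (i : Int) none ≠ -1 ∧
              PySem.Chars.findFrom s ['{', '{'] (i : Int) none < (i : Int)) := by
            rintro ⟨hne, hlt⟩
            obtain ⟨k1, -, -⟩ := PySem.Chars.findFrom_natCast_spec s ['{', '{'] i hi hne
            omega
          rw [pvAloop, dif_pos ⟨hc0, hil⟩,
            if_neg (fun hcon => hT1 ((pvTok_iff '{' s i).mp hcon)),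
            if_pos ((pvTok_iff '}' s i).mpr hT2)]
          rw [pvBloop]
          simp only [hoc, hcc, if_neg hc0, hcF]
          rw [if_neg (show ¬((i : Int) = -1) by omega), if_neg hno]
          simp only [Int.toNat_natCast]
          exact pvLoop_eq s (n - 1) (i + 2) (count - 1) f (by omega) hi2 (by omega)
        · have e1 : PySem.Chars.findFrom s ['{', '{'] (i : Int) none
              = PySem.Chars.findFrom s ['{', '{'] ((i + 1 : Nat) : Int) none :=
            pvFF_step s _ i hil hT1
          have e2 : PySem.Chars.findFrom s ['}', '}'] (i : Int) none
              = PySem.Chars.findFrom s ['}', '}'] ((i + 1 : Nat) : Int) none :=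
            pvFF_step s _ i hil hT2
          rw [pvAloop, dif_pos ⟨hc0, hil⟩,
            if_neg (fun hcon => hT1 ((pvTok_iff '{' s i).mp hcon)),
            if_neg (fun hcon => hT2 ((pvTok_iff '}' s i).mp hcon))]
          rw [pvLoop_eq s (n - 1) (i + 1) count (f + 1) (by omega) (by omega) (by omega)]
          rw [pvBloop, pvBloop]
          simp only [hoc, hcc, if_neg hc0, e1, e2]
    · have hieq : i = s.length := by omega
      have hend : PySem.Chars.findFrom s ['}', '}'] (i : Int) none = -1 := by
        rw [hieq]
        have := pvFF_end s "}}".toList (by decide)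
        rwa [hcc] at this
      rw [pvAloop, dif_neg (by omega), pvBloop]
      simp only [hoc, hcc, if_neg hc0, if_pos hend]
termination_by n
decreasing_by all_goals omega

-- the full functions agree
theorem pvEq (wikitext : String) : extract_infobox_py wikitext = extract_infobox_py_alt wikitext := by
  unfold extract_infobox_py extract_infobox_py_alt
  by_cases hm : PySem.Str.find wikitext "{{Infobox" = -1
  · rw [if_pos hm, if_pos hm]
  · rw [if_neg hm, if_neg hm]
    have hmc : PySem.Chars.find wikitext.toList "{{Infobox".toList ≠ -1 := by
      rwa [PySem.Str.find_eq] at hm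
    have hge : (0:Int) ≤ PySem.Chars.find wikitext.toList "{{Infobox".toList := by
      have h1 := PySem.Chars.neg_one_le_find wikitext.toList "{{Infobox".toList
      omega
    have hpre := (PySem.Chars.find_spec hge).1
    have hlen : (PySem.Str.find wikitext "{{Infobox").toNat + 9 ≤ wikitext.toList.length := by
      have h2 := hpre.length_le
      rw [List.length_drop] at h2
      have h3 : ("{{Infobox".toList).length = 9 := by decide
      rw [PySem.Str.find_eq]
      omega
    have key := pvLoop_eq wikitext.toList wikitext.toList.length
      ((PySem.Str.find wikitext "{{Infobox").toNat + 9) 1 (wikitext.toList.length + 1)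
      (by omega) hlen (by omega)
    rcases hA : pvAloop wikitext.toList ((PySem.Str.find wikitext "{{Infobox").toNat + 9) 1
      with ⟨e, cnt⟩
    rw [hA] at key
    by_cases hcnt : cnt = 0
    · subst hcnt
      rw [if_pos rfl] at key
      rw [← key, if_pos rfl]
    · rw [if_neg hcnt] at key
      rw [← key, if_neg hcnt]

-- ===== VERDICT (by name: the statement is the Claim_ definition above) =====
theorem extract_infobox_py_spec : Claim_equal_extract_infobox_py := by
  intro wikitext _
  exact pvEq wikitext
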